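-- pv_equiv track=rewrite | github.com/Royalty-anis/50-days-python-challenge- | pythonchallenge04ex.py | word_index
-- ===== SOURCE A (Python) =====
-- def word_index(x):
--     max_len = 0
--     index = -1
--     for stuffs in x:
--         if len(stuffs) > max_len:
--             max_len = len(stuffs)
--             index += 1
--         elif len(stuffs) == max_len:
--             pass
--         else:
--             return 0
--     return index
-- ===== SOURCE B (Python) =====
-- def word_index(x):
--     lengths = [len(s) for s in x]
--     if any(b < a for a, b in zip(lengths, lengths[1:])):
--         return 0
--     return len({l for l in lengths if l > 0}) - 1
-- ===== Notes on version B (the rewrite author's own statement) =====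
-- stated objective: simpler
-- what changed: Replaces the running-max/index state machine with a monotonicity check on adjacent lengths plus a set-based count of distinct positive lengths minus one.
import Mathlib
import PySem

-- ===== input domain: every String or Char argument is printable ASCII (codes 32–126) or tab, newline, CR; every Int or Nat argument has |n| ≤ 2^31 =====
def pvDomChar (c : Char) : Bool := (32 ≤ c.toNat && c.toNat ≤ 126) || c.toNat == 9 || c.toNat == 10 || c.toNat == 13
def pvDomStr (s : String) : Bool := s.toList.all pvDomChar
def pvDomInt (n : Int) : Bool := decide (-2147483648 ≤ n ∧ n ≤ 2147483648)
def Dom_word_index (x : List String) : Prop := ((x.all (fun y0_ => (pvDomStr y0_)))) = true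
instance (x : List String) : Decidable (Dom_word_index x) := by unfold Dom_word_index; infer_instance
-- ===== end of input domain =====

-- B replaces A's running-max/index state machine by an adjacent-monotonicity check plus a
-- set-based count of distinct positive lengths minus one (objective: simpler; same behaviour).

-- ===== PORT A =====
-- A's for-loop with state (max_len, index); 'return 0' is the third branch.
def wordIndexLoopA : List String → Int → Int → Int
  | [], _, index => index
  | stuffs :: rest, maxLen, index =>
    if PySem.Str.len stuffs > maxLen then
      wordIndexLoopA rest (PySem.Str.len stuffs) (index + 1)
    else if PySem.Str.len stuffs = maxLen then
      wordIndexLoopA rest maxLen index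
    else 0

def word_index (x : List String) : Int := wordIndexLoopA x 0 (-1)

-- ===== PORT B =====
def word_index_alt (x : List String) : Int :=
  let lengths := x.map PySem.Str.len
  if (lengths.zip (PySem.List.slice lengths (some 1) none)).any (fun p => p.2 < p.1) then 0
  else PySem.Set.len (PySem.Set.ofList (lengths.filter (fun l => 0 < l))) - 1

-- ===== PRECONDITION & SPEC =====
def Spec_word_index (x : List String) (out : Int) : Prop := out = word_index_alt x
instance (x : List String) (out : Int) : Decidable (Spec_word_index x out) := by unfold Spec_word_index; infer_instance

-- ===== CLAIM (what is proved, stated in full; the proofs are below) =====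
def Claim_equal_word_index : Prop := ∀ (x : List String), Dom_word_index x → Spec_word_index x (word_index x)

-- ===== LEMMAS AND PROOFS =====

-- A's loop, restated over the list of lengths.
def pvLoop : List Int → Int → Int → Int
  | [], _, index => index
  | a :: r, m, index =>
    if a > m then pvLoop r a (index + 1)
    else if a = m then pvLoop r m index
    else 0

-- pvBad L m: A's loop, started with running max m, hits its 'return 0' branch.
def pvBad : List Int → Int → Bool
  | [], _ => false
  | a :: r, m => a < m || pvBad r (max m a)

-- pvCnt L m: number of strict increases of the running max started at m.
def pvCnt : List Int → Int → Int
  | [], _ => 0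
  | a :: r, m => (if m < a then 1 else 0) + pvCnt r (max m a)

-- pvPairBad L: some adjacent pair of L strictly decreases.
def pvPairBad : List Int → Bool
  | a :: b :: r => b < a || pvPairBad (b :: r)
  | _ => false

theorem loopA_eq_pvLoop (xs : List String) : ∀ (m i : Int),
    wordIndexLoopA xs m i = pvLoop (xs.map PySem.Str.len) m i := by
  induction xs with
  | nil => intro m i; rfl
  | cons s rest ih =>
    intro m i
    simp only [wordIndexLoopA, List.map_cons, pvLoop]
    split_ifs <;> first | exact ih _ _ | rfl

theorem pvLoop_eq (L : List Int) : ∀ (m i : Int),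
    pvLoop L m i = if pvBad L m then 0 else i + pvCnt L m := by
  induction L with
  | nil => intro m i; simp [pvLoop, pvBad, pvCnt]
  | cons a r ih =>
    intro m i
    by_cases h1 : a > m
    · have hmax : max m a = a := by omega
      have hna : ¬ (a < m) := by omega
      simp only [pvLoop, if_pos h1]
      rw [ih]
      simp only [pvBad, pvCnt, hmax, hna, decide_false, Bool.false_or, if_pos (show m < a from h1)]
      split <;> [rfl; ring]
    · by_cases h2 : a = m
      · subst h2
        have hmax : max a a = a := by omega
        have hna : ¬ (a < a) := by omega
        simp only [pvLoop]
        rw [if_neg h1]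
        rw [if_pos (by trivial), ih]
        simp only [pvBad, pvCnt, hmax, hna, decide_false, Bool.false_or]
        split <;> simp
      · have hlt : a < m := by omega
        simp [pvLoop, if_neg h1, if_neg h2, pvBad, hlt]

theorem bad_eq_pairBad (L : List Int) : ∀ (m : Int), pvBad L m = pvPairBad (m :: L) := by
  induction L with
  | nil => intro m; simp [pvBad, pvPairBad]
  | cons a r ih =>
    intro m
    by_cases h : a < m
    · simp [pvBad, pvPairBad, h]
    · have hmax : max m a = a := by omega
      simp [pvBad, pvPairBad, h, hmax, ih a]

theorem pairBad_eq_anyZip (L : List Int) :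
    pvPairBad L = (L.zip (L.drop 1)).any (fun p => p.2 < p.1) := by
  induction L with
  | nil => simp [pvPairBad]
  | cons a r ih =>
    cases r with
    | nil => simp [pvPairBad]
    | cons b t =>
      simp only [pvPairBad, List.drop_one, List.tail_cons, List.zip_cons_cons, List.any_cons]
      rw [ih]
      simp

theorem bad_false_le (L : List Int) : ∀ (m : Int), pvBad L m = false → ∀ v ∈ L, m ≤ v := by
  induction L with
  | nil => intro m _ v hv; simp at hv
  | cons a r ih =>
    intro m hb v hv
    simp only [pvBad, Bool.or_eq_false_iff, decide_eq_false_iff_not] at hb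
    rcases List.mem_cons.mp hv with rfl | hv'
    · omega
    · have := ih (max m a) hb.2 v hv'
      omega

theorem cnt_eq_card (L : List Int) : ∀ (m : Int), pvBad L m = false →
    ((L.filter (fun l => m < l)).toFinset.card : Int) = pvCnt L m := by
  induction L with
  | nil => intro m _; simp [pvCnt]
  | cons a r ih =>
    intro m hb
    simp only [pvBad, Bool.or_eq_false_iff, decide_eq_false_iff_not] at hb
    have hge : m ≤ a := by omega
    by_cases h : m < a
    · have hmax : max m a = a := by omega
      rw [hmax] at hb
      have hga := bad_false_le r a hb.2
      have hset : ((a :: r).filter (fun l => m < l)).toFinset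
          = insert a (r.filter (fun l => a < l)).toFinset := by
        ext v
        simp only [List.filter_cons, decide_eq_true_eq, if_pos h, List.toFinset_cons,
          Finset.mem_insert, List.mem_toFinset, List.mem_filter, decide_eq_true_eq]
        constructor
        · rintro (rfl | ⟨hvr, hmv⟩)
          · exact Or.inl rfl
          · have hav := hga v hvr
            by_cases hva : v = a
            · exact Or.inl hva
            · exact Or.inr ⟨hvr, by omega⟩
        · rintro (rfl | ⟨hvr, hav⟩)
          · exact Or.inl rfl
          · exact Or.inr ⟨hvr, by omega⟩
      rw [hset, Finset.card_insert_of_notMem]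
      · simp only [pvCnt, if_pos h, hmax]
        rw [← ih a hb.2]
        push_cast
        ring
      · simp only [List.mem_toFinset, List.mem_filter, decide_eq_true_eq]
        intro hc
        exact absurd hc.2 (by omega)
    · have ha : a = m := by omega
      subst ha
      have hmax : max a a = a := by omega
      rw [hmax] at hb
      simp only [List.filter_cons, decide_eq_true_eq, pvCnt, if_neg h, hmax]
      rw [← ih a hb.2]
      ring

theorem setLen_eq_card (ys : List Int) :
    PySem.Set.len (PySem.Set.ofList ys) = (ys.toFinset.card : Int) := by
  have hnd := PySem.Set.nodup_ofList (xs := ys)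
  have hfs : (PySem.Set.ofList ys).toFinset = ys.toFinset := by
    ext v
    simp [List.mem_toFinset, PySem.Set.mem_ofList]
  have := List.toFinset_card_of_nodup hnd
  rw [hfs] at this
  simp [PySem.Set.len, ← this]

theorem str_len_nonneg (s : String) : 0 ≤ PySem.Str.len s := by
  simp [PySem.Str.len_eq]

-- ===== VERDICT (by name: the statement is the Claim_ definition above) =====
theorem word_index_spec : Claim_equal_word_index := by
  intro x _
  unfold Spec_word_index word_index word_index_alt
  rw [loopA_eq_pvLoop, pvLoop_eq]
  simp only [PySem.List.slice_from_one, ← List.drop_one, ← pairBad_eq_anyZip]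
  set L := x.map PySem.Str.len with hL
  have hhead : pvBad L 0 = pvPairBad L := by
    rw [bad_eq_pairBad]
    cases hc : L with
    | nil => simp [pvPairBad]
    | cons a r =>
      have ha : 0 ≤ a := by
        rcases List.mem_map.mp (show a ∈ x.map PySem.Str.len from by
          rw [← hL, hc]; exact List.mem_cons_self) with ⟨s, _, rfl⟩
        exact str_len_nonneg s
      have : ¬ (a < 0) := by omega
      simp [pvPairBad, this]
  rw [← hhead]
  by_cases hb : pvBad L 0 = true
  · simp [hb]
  · have hb' : pvBad L 0 = false := by simpa using hb
    simp only [hb', if_false, Bool.false_eq_true]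
    rw [setLen_eq_card, cnt_eq_card L 0 hb']
    ring
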